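-- pv_equiv track=rewrite | github.com/tgilmore7959/comp110-23f-workspace | exercises/ex06/dictionary.py | count
-- ===== SOURCE A (Python) =====
-- def count(input_list: list[str]) -> dict[str, int]:
--     """Word Counter from list."""
--     output_dict: dict[str, int] = {}
--     for item in input_list:
--         if item in output_dict:
--             output_dict[item] += 1
--         else:
--             output_dict[item] = 1
--     return output_dict
-- ===== SOURCE B (Python) =====
-- def count(input_list: list[str]) -> dict[str, int]:
--     """Word Counter from list: count each distinct string by rescanning the list."""
--     return {item: input_list.count(item) for item in dict.fromkeys(input_list)}
-- ===== Notes on version B (the rewrite author's own statement) =====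
-- stated objective: alternative
-- what changed: Replaces the single incremental counter-dict pass with a distinct-keys pass (dict.fromkeys) followed by a full list.count rescan per distinct key.
import Mathlib
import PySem

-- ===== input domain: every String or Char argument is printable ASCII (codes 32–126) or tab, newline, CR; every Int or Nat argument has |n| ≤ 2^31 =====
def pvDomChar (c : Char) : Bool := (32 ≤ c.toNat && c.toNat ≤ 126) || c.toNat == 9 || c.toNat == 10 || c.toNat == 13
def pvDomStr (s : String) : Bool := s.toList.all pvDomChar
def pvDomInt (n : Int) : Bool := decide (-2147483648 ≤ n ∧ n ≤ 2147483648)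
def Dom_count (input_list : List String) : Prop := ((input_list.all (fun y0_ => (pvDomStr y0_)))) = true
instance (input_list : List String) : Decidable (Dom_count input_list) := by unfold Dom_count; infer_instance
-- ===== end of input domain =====

-- ===== PORT A =====
def count (input_list : List String) : List (String × Int) :=
  (input_list.foldl
    (fun output_dict item =>
      if output_dict.contains item then
        output_dict.insert item (output_dict.getD item 0 + 1)
      else
        output_dict.insert item 1)
    (PySem.Dict.empty : PySem.Dict String Int)).items

-- ===== PORT B =====
def count_alt (input_list : List String) : List (String × Int) :=
  (PySem.List.dedup input_list).map (fun item => (item, (PySem.List.count input_list item : Int)))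

-- ===== PRECONDITION & SPEC =====
def Spec_count (input_list : List String) (out : List (String × Int)) : Prop := out = count_alt input_list
instance (input_list : List String) (out : List (String × Int)) : Decidable (Spec_count input_list out) := by unfold Spec_count; infer_instance

-- ===== CLAIM (what is proved, stated in full; the proofs are below) =====
def Claim_equal_count : Prop := ∀ (input_list : List String), Dom_count input_list → Spec_count input_list (count input_list)

-- ===== LEMMAS AND PROOFS =====

-- ===== VERDICT (by name: the statement is the Claim_ definition above) =====
-- A's loop body is exactly the insert-getD-add-one counter step.
theorem count_step_eq :
    (fun (d : PySem.Dict String Int) (x : String) =>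
      if d.contains x then d.insert x (d.getD x 0 + 1) else d.insert x 1)
    = fun d x => d.insert x (d.getD x 0 + 1) := by
  funext d x
  by_cases h : d.contains x
  · simp [h]
  · have hg : d.getD x 0 = 0 := PySem.Dict.getD_of_not_contains d 0 (by simpa using h)
    simp [h, hg]

theorem count_spec : Claim_equal_count := by
  intro xs _
  unfold Spec_count count count_alt
  rw [count_step_eq, PySem.Dict.foldl_insert_getD_add_one_eq_counter,
      PySem.Dict.items_counter]
  simp [PySem.List.count_eq]
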